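-- pv_equiv track=rewrite | github.com/eordo/advent-of-code | day_01.py | part_2
-- ===== SOURCE A (Python) =====
-- def part_2(rotations, position=50):
--     zero_count = 0
--     for rotation in rotations:
--         for _ in range(abs(rotation)):
--             position += (-1 if rotation < 0 else 1)
--             position %= 100
--             if position == 0:
--                 zero_count += 1
--     return zero_count
-- ===== SOURCE B (Python) =====
-- def part_2(rotations, position=50):
--     p = position % 100
--     count = 0
--     for r in rotations:
--         if r >= 0:
--             count += (p + r) // 100
--         else:
--             count += (p - 1) // 100 - (p + r - 1) // 100
--         p = (p + r) % 100
--     return count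
-- ===== Notes on version B (the rewrite author's own statement) =====
-- stated objective: faster
-- what changed: Replaces the step-by-step walk (one iteration per unit of each rotation) with an O(1) floor-division count of multiples of 100 crossed per rotation, keeping the position normalized mod 100.
import Mathlib
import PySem

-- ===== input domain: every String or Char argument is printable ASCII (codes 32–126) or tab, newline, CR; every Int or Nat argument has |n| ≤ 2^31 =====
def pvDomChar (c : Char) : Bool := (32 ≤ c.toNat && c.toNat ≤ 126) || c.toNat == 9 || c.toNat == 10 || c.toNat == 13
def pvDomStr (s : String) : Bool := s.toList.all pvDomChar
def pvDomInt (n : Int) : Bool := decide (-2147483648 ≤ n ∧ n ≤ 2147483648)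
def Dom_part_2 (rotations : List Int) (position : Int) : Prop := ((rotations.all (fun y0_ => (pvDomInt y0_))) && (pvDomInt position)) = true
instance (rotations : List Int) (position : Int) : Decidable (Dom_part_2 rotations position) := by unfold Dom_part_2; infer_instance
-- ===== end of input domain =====

-- B replaces A's unit-step walk by an O(1) floor-division count of zero-hits per rotation (objective: faster).

-- ===== PORT A =====
-- one unit step of A's inner loop: move by ±1, wrap mod 100, count a zero hit
def part2_istep (rotation : Int) (st2 : Int × Int) : Int × Int :=
  let p := PySem.Int.mod (st2.1 + (if rotation < 0 then -1 else 1)) 100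
  (p, st2.2 + (if p = 0 then (1 : Int) else 0))

def part_2 (rotations : List Int) (position : Int) : Int :=
  (rotations.foldl
    (fun st rotation =>
      (List.range rotation.natAbs).foldl (fun st2 _ => part2_istep rotation st2) st)
    (position, 0)).2

-- ===== PORT B =====
-- one rotation of B: arithmetic count of multiples of 100 crossed, position kept mod 100
def part2_rstep (st : Int × Int) (r : Int) : Int × Int :=
  let c := if 0 ≤ r then PySem.Int.floordiv (st.1 + r) 100
           else PySem.Int.floordiv (st.1 - 1) 100 - PySem.Int.floordiv (st.1 + r - 1) 100
  (PySem.Int.mod (st.1 + r) 100, st.2 + c)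

def part_2_alt (rotations : List Int) (position : Int) : Int :=
  (rotations.foldl part2_rstep (PySem.Int.mod position 100, 0)).2

-- ===== PRECONDITION & SPEC =====
def Spec_part_2 (rotations : List Int) (position : Int) (out : Int) : Prop := out = part_2_alt rotations position
instance (rotations : List Int) (position : Int) (out : Int) : Decidable (Spec_part_2 rotations position out) := by unfold Spec_part_2; infer_instance

-- ===== CLAIM (what is proved, stated in full; the proofs are below) =====
def Claim_equal_part_2 : Prop := ∀ (rotations : List Int) (position : Int), Dom_part_2 rotations position → Spec_part_2 rotations position (part_2 rotations position)

-- ===== LEMMAS AND PROOFS =====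

theorem pv_mod100 (x : Int) : PySem.Int.mod x 100 = x % 100 :=
  PySem.Int.mod_eq_emod_of_pos (by norm_num)

theorem pv_fdiv100 (x : Int) : PySem.Int.floordiv x 100 = x / 100 :=
  PySem.Int.floordiv_eq_ediv_of_pos (by norm_num)

theorem istep_eval (r p c : Int) :
    part2_istep r (p, c) =
      ((p + (if r < 0 then -1 else 1)) % 100,
       c + (if (p + (if r < 0 then -1 else 1)) % 100 = 0 then (1 : Int) else 0)) := by
  simp [part2_istep]

-- inner loop, nonnegative rotation: final position mod 100 and exact count
theorem innerPos (r : Int) (hr : ¬ r < 0) (n : Nat) : ∀ (p c : Int),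
    (((List.range n).foldl (fun st2 _ => part2_istep r st2) (p, c)).1 % 100 = (p + n) % 100)
    ∧ (((List.range n).foldl (fun st2 _ => part2_istep r st2) (p, c)).2
        = c + ((p + n) / 100 - p / 100)) := by
  induction n with
  | zero => intro p c; simp
  | succ m ih =>
      intro p c
      rw [List.range_succ, List.foldl_append]
      obtain ⟨h1, h2⟩ := ih p c
      set prev := (List.range m).foldl (fun st2 _ => part2_istep r st2) (p, c) with hprev
      rw [show prev = (prev.1, prev.2) from rfl]
      simp only [List.foldl_cons, List.foldl_nil]
      rw [istep_eval]
      rw [if_neg hr] at *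
      push_cast
      refine ⟨by omega, ?_⟩
      split_ifs with h
      · omega
      · omega

-- inner loop, negative rotation
theorem innerNeg (r : Int) (hr : r < 0) (n : Nat) : ∀ (p c : Int),
    (((List.range n).foldl (fun st2 _ => part2_istep r st2) (p, c)).1 % 100 = (p - n) % 100)
    ∧ (((List.range n).foldl (fun st2 _ => part2_istep r st2) (p, c)).2
        = c + ((p - 1) / 100 - (p - n - 1) / 100)) := by
  induction n with
  | zero => intro p c; simp
  | succ m ih =>
      intro p c
      rw [List.range_succ, List.foldl_append]
      obtain ⟨h1, h2⟩ := ih p c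
      set prev := (List.range m).foldl (fun st2 _ => part2_istep r st2) (p, c) with hprev
      rw [show prev = (prev.1, prev.2) from rfl]
      simp only [List.foldl_cons, List.foldl_nil]
      rw [istep_eval]
      rw [if_pos hr] at *
      push_cast
      refine ⟨by omega, ?_⟩
      split_ifs with h
      · omega
      · omega

-- the two folds agree on the count, with B's position normalized mod 100
theorem mainFold (rots : List Int) : ∀ (p c : Int),
    ((rots.foldl
        (fun st rotation =>
          (List.range rotation.natAbs).foldl (fun st2 _ => part2_istep rotation st2) st)
        (p, c)).2)
    = ((rots.foldl part2_rstep (p % 100, c)).2) := by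
  induction rots with
  | nil => intro p c; simp
  | cons r rest ih =>
      intro p c
      simp only [List.foldl_cons]
      set A1 := (List.range r.natAbs).foldl (fun st2 _ => part2_istep r st2) (p, c) with hA1
      rw [show A1 = (A1.1, A1.2) from rfl, ih A1.1 A1.2]
      suffices h : part2_rstep (p % 100, c) r = (A1.1 % 100, A1.2) by rw [h]
      simp only [part2_rstep, pv_mod100, pv_fdiv100]
      by_cases hr : r < 0
      · have hn : (r.natAbs : Int) = -r := by omega
        obtain ⟨h1, h2⟩ := innerNeg r hr r.natAbs p c
        rw [hn] at h1 h2
        rw [← hA1] at h1 h2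
        rw [if_neg (by omega : ¬ (0:Int) ≤ r)]
        refine Prod.ext (by omega) (by omega)
      · have hn : (r.natAbs : Int) = r := by omega
        obtain ⟨h1, h2⟩ := innerPos r hr r.natAbs p c
        rw [hn] at h1 h2
        rw [← hA1] at h1 h2
        rw [if_pos (by omega : (0:Int) ≤ r)]
        refine Prod.ext (by omega) (by omega)

-- ===== VERDICT (by name: the statement is the Claim_ definition above) =====
theorem part_2_spec : Claim_equal_part_2 := by
  intro rotations position _
  unfold Spec_part_2 part_2 part_2_alt
  rw [pv_mod100]
  exact mainFold rotations position 0
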